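-- pv_equiv track=rewrite | github.com/petrosernivka/Lessons_Python | Arrays_of_Lists_of_Sets.py | solve
-- ===== SOURCE A (Python) =====
-- def solve(arr):
--     for element in arr:
--         arr[arr.index(element)] = ''.join(sorted(set(element)))
--
--     sum_positions = []
--     already_used = []
--     for element in arr:
--         if element not in already_used and arr.count(element) > 1:
--             sum_positions.append(0)
--             next_pos_elem = arr.index(element)
--             for i in range(arr.count(element)):
--                 next_pos_elem = arr.index(element, next_pos_elem + min(1, i))
--                 sum_positions[-1] += arr.index(element, next_pos_elem)
--             already_used.append(element)
--
--     return sorted(sum_positions)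
-- ===== SOURCE B (Python) =====
-- # One-pass re-implementation: normalize once, aggregate index sums and counts
-- # in a single dict pass (A mutates arr in place; B does not — return value only).
-- def solve(arr):
--     norm = [''.join(sorted(set(e))) for e in arr]
--     acc = {}
--     for i, e in enumerate(norm):
--         s, c = acc.get(e, (0, 0))
--         acc[e] = (s + i, c + 1)
--     return sorted(s for s, c in acc.values() if c > 1)
-- ===== Notes on version B (the rewrite author's own statement) =====
-- stated objective: faster
-- what changed: Replaces A's repeated arr.index/arr.count scans (in-place normalization loop plus a per-duplicate-group scan loop) with one normalization map and a single dict pass accumulating index-sum and count per normalized value; A also mutates arr in place, B does not (return value compared).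
import Mathlib
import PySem

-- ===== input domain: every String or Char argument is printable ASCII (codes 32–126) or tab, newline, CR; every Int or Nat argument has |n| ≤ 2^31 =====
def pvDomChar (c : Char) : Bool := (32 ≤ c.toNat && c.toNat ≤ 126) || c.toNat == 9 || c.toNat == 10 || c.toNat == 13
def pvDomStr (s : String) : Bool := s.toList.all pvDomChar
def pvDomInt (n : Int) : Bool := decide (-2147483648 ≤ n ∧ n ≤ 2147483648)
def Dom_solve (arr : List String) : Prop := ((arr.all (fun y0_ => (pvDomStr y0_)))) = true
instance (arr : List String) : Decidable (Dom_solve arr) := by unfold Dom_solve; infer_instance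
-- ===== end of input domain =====

-- B replaces A's repeated index/count rescans by one normalisation map plus a single dict pass;
-- A mutates arr in place while B does not, so the equivalence is about the return value only.

-- ===== PORT A =====
-- ''.join(sorted(set(s))) — normalisation of one element, shared by both ports
def pyNormalize (s : String) : String :=
  String.ofList (PySem.List.sorted (PySem.Set.ofList s.toList) (fun c => c) false)

-- arr.index(e, start) for a Nat start; at A's call sites e is always present at/after start,
-- so the ValueError branch (getD's default) is dead code
def pyIndexFrom (b : List String) (e : String) (start : Nat) : Nat :=
  start + ((PySem.List.index? (b.drop start) e).getD 0)

-- 'for element in arr: arr[arr.index(element)] = ...' — Python iterates by index over the list it mutates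
def solveNormLoop (arr : List String) : List String :=
  (List.range arr.length).foldl
    (fun a i =>
      let element := PySem.List.pyGetD a (Int.ofNat i) ""
      let j := (PySem.List.index? a element).getD 0   -- arr.index(element): element = a[i] is present
      PySem.List.pySetD a (j : Int) (pyNormalize element))
    arr

def solve (arr : List String) : List Int :=
  let a := solveNormLoop arr
  let st := a.foldl
    (fun (st : List Int × List String) element =>
      if element ∉ st.2 ∧ 1 < a.count element then
        let sp := st.1 ++ [(0 : Int)]
        let next0 := (PySem.List.index? a element).getD 0
        let q := (List.range (a.count element)).foldl
          (fun (p : List Int × Nat) i =>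
            let next := pyIndexFrom a element (p.2 + min 1 i)
            (PySem.List.pySetD p.1 (-1)
              (PySem.List.pyGetD p.1 (-1) 0 + (pyIndexFrom a element next : Int)), next))
          (sp, next0)
        (q.1, st.2 ++ [element])
      else st)
    ([], [])
  PySem.List.sorted st.1 (fun x => x) false

-- ===== PORT B =====
def solve_alt (arr : List String) : List Int :=
  let norm := arr.map pyNormalize
  let acc := (PySem.List.enumerate norm 0).foldl
    (fun (d : PySem.Dict String (Int × Int)) p =>
      d.modify p.2 ((0 : Int), (0 : Int)) (fun sc => (sc.1 + p.1, sc.2 + 1)))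
    PySem.Dict.empty
  PySem.List.sorted ((acc.values.filter (fun sc => 1 < sc.2)).map (fun sc => sc.1)) (fun x => x) false

-- ===== PRECONDITION & SPEC =====
def Spec_solve (arr : List String) (out : List Int) : Prop := out = solve_alt arr
instance (arr : List String) (out : List Int) : Decidable (Spec_solve arr out) := by unfold Spec_solve; infer_instance

-- ===== CLAIM (what is proved, stated in full; the proofs are below) =====
def Claim_equal_solve : Prop := ∀ (arr : List String), Dom_solve arr → Spec_solve arr (solve arr)

-- ===== LEMMAS AND PROOFS =====

-- sum of the (offset) indices at which e occurs in l
def sumIdxFrom (l : List String) (e : String) (s : Int) : Int :=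
  match l with
  | [] => 0
  | x :: t => (if x = e then s else 0) + sumIdxFrom t e (s + 1)

-- the common normal form both programs reduce to: for each distinct normalised value occurring
-- more than once, the sum of its occurrence indices, then sorted
def dupSums (b : List String) : List Int :=
  ((PySem.Set.ofList b).filter (fun e => decide (1 < b.count e))).map (fun e => sumIdxFrom b e 0)

-- proof-side names for the two ports' loop bodies (definitionally equal to the lambdas in the ports)
def innerStep (b : List String) (e : String) : List Int × Nat → Nat → List Int × Nat :=
  fun p i =>
    let next := pyIndexFrom b e (p.2 + min 1 i)
    (PySem.List.pySetD p.1 (-1)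
      (PySem.List.pyGetD p.1 (-1) 0 + (pyIndexFrom b e next : Int)), next)

def chainStep (b : List String) (e : String) : List Int × Nat → List Int × Nat :=
  fun p =>
    let next := pyIndexFrom b e (p.2 + 1)
    (PySem.List.pySetD p.1 (-1)
      (PySem.List.pyGetD p.1 (-1) 0 + (pyIndexFrom b e next : Int)), next)

def outerStep (b : List String) : List Int × List String → String → List Int × List String :=
  fun st element =>
    if element ∉ st.2 ∧ 1 < b.count element then
      let sp := st.1 ++ [(0 : Int)]
      let next0 := (PySem.List.index? b element).getD 0
      let q := (List.range (b.count element)).foldl (innerStep b element) (sp, next0)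
      (q.1, st.2 ++ [element])
    else st

def dictStep : PySem.Dict String (Int × Int) → Int × String → PySem.Dict String (Int × Int) :=
  fun d p => d.modify p.2 ((0 : Int), (0 : Int)) (fun sc => (sc.1 + p.1, sc.2 + 1))

theorem pyNormalize_idem (s : String) : pyNormalize (pyNormalize s) = pyNormalize s := by
  unfold pyNormalize
  have hnd : (PySem.List.sorted (PySem.Set.ofList s.toList) (fun c => c) false).Nodup :=
    (PySem.List.sorted_perm (PySem.Set.ofList s.toList) (fun c => c) false).symm.nodup
      (PySem.Set.nodup_ofList _)
  rw [String.toList_ofList, PySem.Set.ofList_eq_self_of_nodup _ hnd, PySem.List.sorted_sorted]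

theorem pyNormalize_of_mem_map {x : String} {l : List String} (h : x ∈ l.map pyNormalize) :
    pyNormalize x = x := by
  obtain ⟨y, -, rfl⟩ := List.mem_map.mp h
  exact pyNormalize_idem y

theorem index?_append_not_mem {α : Type} [BEq α] [LawfulBEq α] {v : α} {pre : List α}
    (suf : List α) (h : v ∉ pre) :
    PySem.List.index? (pre ++ suf) v = (PySem.List.index? suf v).map (· + pre.length) := by
  induction pre with
  | nil => simp
  | cons x t ih =>
    have hx : x ≠ v := fun he => h (he ▸ List.mem_cons_self)
    have ht : v ∉ t := fun hm => h (List.mem_cons_of_mem _ hm)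
    rw [List.cons_append, PySem.List.index?_cons_of_ne _ hx, ih ht]
    cases PySem.List.index? suf v <;> simp <;> omega

theorem set_append_length {α : Type} (l1 : List α) (x : α) (rest : List α) (v : α) :
    (l1 ++ x :: rest).set l1.length v = l1 ++ v :: rest := by
  induction l1 with
  | nil => simp
  | cons y t ih => simp [ih]

theorem solveNormLoop_eq (arr : List String) : solveNormLoop arr = arr.map pyNormalize := by
  unfold solveNormLoop
  have key : ∀ m, m ≤ arr.length →
      (List.range m).foldl
        (fun a i =>
          let element := PySem.List.pyGetD a (Int.ofNat i) ""
          let j := (PySem.List.index? a element).getD 0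
          PySem.List.pySetD a (j : Int) (pyNormalize element))
        arr = (arr.take m).map pyNormalize ++ arr.drop m := by
    intro m
    induction m with
    | zero => simp
    | succ m ih =>
      intro hm
      have hmlt : m < arr.length := by omega
      rw [List.range_succ, List.foldl_append, ih (by omega)]
      set pre := (arr.take m).map pyNormalize with hpre
      have hprelen : pre.length = m := by
        simp [hpre, List.length_take, Nat.min_eq_left (le_of_lt hmlt)]
      have hdrop : arr.drop m = arr[m] :: arr.drop (m + 1) := List.drop_eq_getElem_cons hmlt
      have helem : PySem.List.pyGetD (pre ++ arr.drop m) (Int.ofNat m) "" = arr[m] := by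
        rw [show (Int.ofNat m) = ((m : Nat) : Int) from rfl, PySem.List.pyGetD_natCast, hdrop]
        rw [List.getD_eq_getElem?_getD, List.getElem?_append_right (by omega)]
        simp [hprelen, List.getElem?_eq_getElem hmlt]
      simp only [List.foldl_cons, List.foldl_nil, helem]
      by_cases hmem : arr[m] ∈ pre
      · -- write lands on an earlier, already-normalised copy; it is a no-op
        have hnorm : pyNormalize arr[m] = arr[m] := pyNormalize_of_mem_map (hpre ▸ hmem)
        have hs : (PySem.List.index? pre arr[m]).isSome := by simp [hmem]
        obtain ⟨k, hk⟩ := Option.isSome_iff_exists.mp hs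
        rw [PySem.List.index?_append_of_mem _ hmem, hk]
        obtain ⟨hklt, hkv, -⟩ := PySem.List.getElem_of_index?_eq_some hk
        have hklt' : k < (pre ++ arr.drop m).length := by simp; omega
        have hgk : (pre ++ arr.drop m)[k]'hklt' = arr[m] := by
          rw [List.getElem_append_left hklt]; exact hkv
        simp only [Option.getD_some, PySem.List.pySetD_natCast, hnorm]
        rw [← hgk, List.set_getElem_self]
        rw [List.take_add_one]
        simp only [List.getElem?_eq_getElem hmlt, Option.toList_some, List.map_append,
          List.map_cons, List.map_nil, List.append_assoc, List.cons_append, List.nil_append]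
        rw [hdrop, hnorm]
      · -- first occurrence of this element is at position m itself
        have hidx : PySem.List.index? (pre ++ arr.drop m) arr[m] = some m := by
          rw [index?_append_not_mem _ hmem, hdrop, PySem.List.index?_cons_self]
          simp [hprelen]
        rw [hidx]
        simp only [Option.getD_some, PySem.List.pySetD_natCast]
        rw [hdrop, List.take_add_one]
        have hset := set_append_length pre arr[m] (arr.drop (m + 1)) (pyNormalize arr[m])
        rw [hprelen] at hset
        rw [hset]
        simp only [List.getElem?_eq_getElem hmlt, Option.toList_some, List.map_append,
          List.map_cons, List.map_nil, List.append_assoc, List.cons_append, List.nil_append]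
        rfl
  have := key arr.length (le_refl _)
  simpa using this

theorem sumIdxFrom_of_not_mem {l : List String} {e : String} (h : e ∉ l) :
    ∀ s, sumIdxFrom l e s = 0 := by
  induction l with
  | nil => intro s; rfl
  | cons x t ih =>
    intro s
    have hx : x ≠ e := fun he => h (he ▸ List.mem_cons_self)
    have ht : e ∉ t := fun hm => h (List.mem_cons_of_mem _ hm)
    simp [sumIdxFrom, hx, ih ht]

theorem sumIdxFrom_append (l1 l2 : List String) (e : String) :
    ∀ s, sumIdxFrom (l1 ++ l2) e s = sumIdxFrom l1 e s + sumIdxFrom l2 e (s + l1.length) := by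
  induction l1 with
  | nil => intro s; simp [sumIdxFrom]
  | cons x t ih =>
    intro s
    simp only [List.cons_append, sumIdxFrom, ih (s + 1), List.length_cons]
    push_cast
    ring

theorem pyGetD_last (l : List Int) (x : Int) : PySem.List.pyGetD (l ++ [x]) (-1) 0 = x := by
  simp [PySem.List.pyGetD, PySem.List.pyGet?, PySem.List.pyIdx?]

theorem pySetD_last (l : List Int) (x v : Int) :
    PySem.List.pySetD (l ++ [x]) (-1) v = l ++ [v] := by
  simp [PySem.List.pySetD, PySem.List.pySet?, PySem.List.pyIdx?]

theorem pyIndexFrom_self (b : List String) (e : String) (p : Nat) (h : b[p]? = some e) :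
    pyIndexFrom b e p = p := by
  obtain ⟨hlt, hv⟩ := List.getElem?_eq_some_iff.mp h
  unfold pyIndexFrom
  rw [List.drop_eq_getElem_cons hlt, hv, PySem.List.index?_cons_self]
  rfl

theorem foldl_const_step {α β : Type} (l : List β) (g : α → α) :
    ∀ a, l.foldl (fun acc _ => g acc) a = g^[l.length] a := by
  induction l with
  | nil => intro a; rfl
  | cons x t ih =>
    intro a
    simp only [List.foldl_cons, List.length_cons, Function.iterate_succ_apply, ih]

theorem chain_eq (b : List String) (e : String) :
    ∀ (m p : Nat) (x : Int) (sp0 : List Int), b[p]? = some e → (b.drop (p + 1)).count e = m →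
      ∃ p' : Nat, (chainStep b e)^[m] (sp0 ++ [x], p)
        = (sp0 ++ [x + sumIdxFrom (b.drop (p + 1)) e ((p : Int) + 1)], p') := by
  intro m
  induction m with
  | zero =>
    intro p x sp0 hp hc
    refine ⟨p, ?_⟩
    have hnm : e ∉ b.drop (p + 1) := by
      intro hmem
      have := List.count_pos_iff.mpr hmem
      omega
    simp [sumIdxFrom_of_not_mem hnm]
  | succ m ih =>
    intro p x sp0 hp hc
    have hmem : e ∈ b.drop (p + 1) := List.count_pos_iff.mp (by omega)
    have hs : (PySem.List.index? (b.drop (p + 1)) e).isSome := by simp [hmem]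
    obtain ⟨k, hk⟩ := Option.isSome_iff_exists.mp hs
    obtain ⟨pre, suf, hsplit, hklen, hknm⟩ := (PySem.List.index?_eq_some_iff _ _ _).mp hk
    have hb2 : b[p + 1 + k]? = some e := by
      have h1 : (b.drop (p + 1))[k]? = b[p + 1 + k]? := List.getElem?_drop
      rw [← h1, hsplit, List.getElem?_append_right (by omega)]
      simp [hklen]
    have hdrop2 : b.drop (p + 1 + k + 1) = suf := by
      rw [show p + 1 + k + 1 = (p + 1) + (k + 1) from by omega, ← List.drop_drop, hsplit]
      rw [show pre ++ e :: suf = (pre ++ [e]) ++ suf from by simp,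
          show k + 1 = (pre ++ [e]).length from by simp [hklen], List.drop_left]
    have hcnt2 : suf.count e = m := by
      rw [hsplit, List.count_append, List.count_cons_self, List.count_eq_zero.mpr hknm] at hc
      omega
    have hstep : chainStep b e (sp0 ++ [x], p) = (sp0 ++ [x + (p + 1 + k : Nat)], p + 1 + k) := by
      unfold chainStep
      have hnext : pyIndexFrom b e (p + 1) = p + 1 + k := by
        unfold pyIndexFrom; rw [hk]; rfl
      simp only [hnext, pyIndexFrom_self b e _ hb2, pyGetD_last, pySetD_last]
    rw [Function.iterate_succ_apply, hstep]
    obtain ⟨p', hp'⟩ := ih (p + 1 + k) (x + (p + 1 + k : Nat)) sp0 hb2 (by rw [hdrop2]; exact hcnt2)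
    refine ⟨p', ?_⟩
    rw [hp', hdrop2]
    have harith : x + ((p + 1 + k : Nat) : Int) + sumIdxFrom suf e (((p + 1 + k : Nat) : Int) + 1)
        = x + sumIdxFrom (b.drop (p + 1)) e ((p : Int) + 1) := by
      rw [hsplit, sumIdxFrom_append, sumIdxFrom_of_not_mem hknm]
      simp only [sumIdxFrom, if_pos rfl, hklen]
      push_cast
      ring_nf
    rw [harith]

theorem inner_eq (b : List String) (e : String) (q : Nat)
    (hq : PySem.List.index? b e = some q) (sp0 : List Int) :
    ∃ p' : Nat, (List.range (b.count e)).foldl (innerStep b e) (sp0 ++ [(0 : Int)], q)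
      = (sp0 ++ [sumIdxFrom b e 0], p') := by
  obtain ⟨pre, suf, hsplit, hqlen, hnm⟩ := (PySem.List.index?_eq_some_iff _ _ _).mp hq
  have hbq : b[q]? = some e := by
    rw [hsplit, List.getElem?_append_right (by omega)]
    simp [hqlen]
  have hdropq : b.drop (q + 1) = suf := by
    rw [show q + 1 = (pre ++ [e]).length from by simp [hqlen], hsplit,
        show pre ++ e :: suf = (pre ++ [e]) ++ suf from by simp, List.drop_left]
  have hcount : b.count e = suf.count e + 1 := by
    rw [hsplit, List.count_append, List.count_cons_self, List.count_eq_zero.mpr hnm]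
    omega
  rw [hcount, List.range_succ_eq_map, List.foldl_cons]
  have h0 : innerStep b e (sp0 ++ [(0 : Int)], q) 0 = (sp0 ++ [(0 : Int) + (q : Int)], q) := by
    unfold innerStep
    simp only [show min 1 0 = 0 from rfl, Nat.add_zero, pyIndexFrom_self b e q hbq,
      pyGetD_last, pySetD_last]
  rw [h0, List.foldl_map]
  have hfun : (fun (p : List Int × Nat) (i : Nat) => innerStep b e p (Nat.succ i))
      = fun p _ => chainStep b e p := by
    funext p i
    unfold innerStep chainStep
    simp only [show min 1 (Nat.succ i) = 1 from by omega]
  rw [hfun, foldl_const_step, List.length_range]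
  obtain ⟨p', hp'⟩ := chain_eq b e (suf.count e) q ((0 : Int) + (q : Int)) sp0 hbq
    (by rw [hdropq])
  refine ⟨p', ?_⟩
  rw [hp', hdropq]
  have harith : (0 : Int) + (q : Int) + sumIdxFrom suf e ((q : Int) + 1) = sumIdxFrom b e 0 := by
    rw [hsplit, sumIdxFrom_append, sumIdxFrom_of_not_mem hnm]
    simp only [sumIdxFrom, if_pos rfl, hqlen]
    push_cast
    ring_nf
  rw [harith]

theorem outer_eq (b : List String) :
    ∀ (rest pr : List String), b = pr ++ rest →
      rest.foldl (outerStep b)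
        (((PySem.Set.ofList pr).filter (fun e => decide (1 < b.count e))).map
            (fun e => sumIdxFrom b e 0),
          (PySem.Set.ofList pr).filter (fun e => decide (1 < b.count e)))
      = (dupSums b, (PySem.Set.ofList b).filter (fun e => decide (1 < b.count e))) := by
  intro rest
  induction rest with
  | nil =>
    intro pr h
    rw [List.append_nil] at h
    subst h
    rfl
  | cons x rest' ih =>
    intro pr hb
    rw [List.foldl_cons]
    by_cases hcond : x ∉ (PySem.Set.ofList pr).filter (fun e => decide (1 < b.count e))
        ∧ 1 < b.count x
    · have hxpr : x ∉ pr := by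
        intro hmemx
        exact hcond.1 (List.mem_filter.mpr
          ⟨(PySem.Set.mem_ofList _ _).mpr hmemx, by simp [hcond.2]⟩)
      have hxb : x ∈ b := by
        rw [hb]; exact List.mem_append_right _ List.mem_cons_self
      have hs : (PySem.List.index? b x).isSome := by simp [hxb]
      obtain ⟨q, hq⟩ := Option.isSome_iff_exists.mp hs
      obtain ⟨p', hinner⟩ := inner_eq b x q hq
        (((PySem.Set.ofList pr).filter (fun e => decide (1 < b.count e))).map
          (fun e => sumIdxFrom b e 0))
      have hstep : outerStep b
          (((PySem.Set.ofList pr).filter (fun e => decide (1 < b.count e))).map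
              (fun e => sumIdxFrom b e 0),
            (PySem.Set.ofList pr).filter (fun e => decide (1 < b.count e))) x
          = (((PySem.Set.ofList pr).filter (fun e => decide (1 < b.count e))).map
                (fun e => sumIdxFrom b e 0) ++ [sumIdxFrom b x 0],
              (PySem.Set.ofList pr).filter (fun e => decide (1 < b.count e)) ++ [x]) := by
        unfold outerStep
        rw [if_pos hcond, hq]
        simp only [Option.getD_some, hinner]
      rw [hstep]
      have hofl : (PySem.Set.ofList (pr ++ [x])).filter (fun e => decide (1 < b.count e))
          = (PySem.Set.ofList pr).filter (fun e => decide (1 < b.count e)) ++ [x] := by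
        rw [PySem.Set.ofList_append_singleton,
            PySem.Set.add_of_not_mem (fun hm => hxpr ((PySem.Set.mem_ofList _ _).mp hm)),
            List.filter_append]
        simp [hcond.2]
      have hrec := ih (pr ++ [x]) (by rw [hb, List.append_assoc]; rfl)
      rw [hofl, List.map_append] at hrec
      exact hrec
    · have hcond' : ¬ (x ∉ (PySem.Set.ofList pr).filter (fun e => decide (1 < b.count e))
          ∧ 1 < b.count x) := hcond
      have hstep : outerStep b
          (((PySem.Set.ofList pr).filter (fun e => decide (1 < b.count e))).map
              (fun e => sumIdxFrom b e 0),
            (PySem.Set.ofList pr).filter (fun e => decide (1 < b.count e))) x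
          = (((PySem.Set.ofList pr).filter (fun e => decide (1 < b.count e))).map
                (fun e => sumIdxFrom b e 0),
              (PySem.Set.ofList pr).filter (fun e => decide (1 < b.count e))) := by
        unfold outerStep
        rw [if_neg hcond']
      rw [hstep]
      have hofl : (PySem.Set.ofList (pr ++ [x])).filter (fun e => decide (1 < b.count e))
          = (PySem.Set.ofList pr).filter (fun e => decide (1 < b.count e)) := by
        rw [PySem.Set.ofList_append_singleton]
        by_cases hxm : x ∈ PySem.Set.ofList pr
        · rw [PySem.Set.add_of_mem hxm]
        · rw [PySem.Set.add_of_not_mem hxm, List.filter_append]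
          have hc2 : ¬ 1 < b.count x := by
            intro h1
            refine hcond' ⟨?_, h1⟩
            intro hxu
            exact hxm (List.mem_filter.mp hxu).1
          simp [hc2]
      have hrec := ih (pr ++ [x]) (by rw [hb, List.append_assoc]; rfl)
      rw [hofl] at hrec
      exact hrec

theorem solve_eq (arr : List String) :
    solve arr = PySem.List.sorted (dupSums (arr.map pyNormalize)) (fun x => x) false := by
  have h := outer_eq (arr.map pyNormalize) (arr.map pyNormalize) [] (by simp)
  unfold solve
  rw [solveNormLoop_eq]
  show PySem.List.sorted
      ((arr.map pyNormalize).foldl (outerStep (arr.map pyNormalize)) ([], [])).1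
      (fun x => x) false = _
  have hinit : (([] : List Int), ([] : List String))
      = (((PySem.Set.ofList ([] : List String)).filter
            (fun e => decide (1 < (arr.map pyNormalize).count e))).map
          (fun e => sumIdxFrom (arr.map pyNormalize) e 0),
        (PySem.Set.ofList ([] : List String)).filter
          (fun e => decide (1 < (arr.map pyNormalize).count e))) := rfl
  rw [hinit, h]

theorem dict_items (pr : List String) :
    ((PySem.List.enumerate pr 0).foldl dictStep PySem.Dict.empty).items
      = (PySem.Set.ofList pr).map
          (fun e => (e, (sumIdxFrom pr e 0, (pr.count e : Int)))) := by
  induction pr using List.reverseRecOn with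
  | nil => rfl
  | append_singleton pr' x ih =>
    rw [PySem.List.enumerate_append, List.foldl_append]
    rw [show PySem.List.enumerate [x] ((0 : Int) + (pr'.length : Int))
        = [((pr'.length : Int), x)] from by rw [PySem.List.enumerate_cons]; simp]
    rw [List.foldl_cons, List.foldl_nil]
    set d := (PySem.List.enumerate pr' 0).foldl dictStep PySem.Dict.empty with hd
    have hkeys : d.keys = PySem.Set.ofList pr' := by
      show d.items.map (·.1) = _
      rw [ih, List.map_map]
      exact List.map_id _
    have hnd : d.keys.Nodup := hkeys ▸ PySem.Set.nodup_ofList _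
    have hmodify : dictStep d ((pr'.length : Int), x)
        = d.insert x ((d.getD x ((0 : Int), (0 : Int))).1 + (pr'.length : Int),
            (d.getD x ((0 : Int), (0 : Int))).2 + 1) := rfl
    by_cases hx : x ∈ PySem.Set.ofList pr'
    · have hcont : d.contains x = true := (PySem.Dict.contains_iff_mem_keys _ _).mpr (hkeys ▸ hx)
      have hget : d.getD x ((0 : Int), (0 : Int))
          = (sumIdxFrom pr' x 0, (pr'.count x : Int)) := by
        refine PySem.Dict.getD_of_mem_items d ?_ hnd _
        rw [ih]
        exact List.mem_map.mpr ⟨x, hx, rfl⟩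
      rw [hmodify, PySem.Dict.items_insert_of_contains _ _ hcont, ih, hget,
          PySem.Set.ofList_append_singleton, PySem.Set.add_of_mem hx, List.map_map]
      apply List.map_congr_left
      intro e hemem
      by_cases hex : e = x
      · subst hex
        simp only [Function.comp_apply, beq_self_eq_true, if_true]
        have hsum : sumIdxFrom (pr' ++ [e]) e 0 = sumIdxFrom pr' e 0 + (pr'.length : Int) := by
          rw [sumIdxFrom_append]
          simp [sumIdxFrom]
        have hcnt : ((pr' ++ [e]).count e : Int) = (pr'.count e : Int) + 1 := by
          rw [List.count_append]
          simp
        rw [hsum, hcnt]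
      · have hbeq : (e == x) = false := beq_eq_false_iff_ne.mpr hex
        have hsum : sumIdxFrom (pr' ++ [x]) e 0 = sumIdxFrom pr' e 0 := by
          rw [sumIdxFrom_append, sumIdxFrom_of_not_mem (l := [x]) (by simpa using hex)]
          ring
        have hcnt : (pr' ++ [x]).count e = pr'.count e := by
          rw [List.count_append]
          simp [Ne.symm hex]
        simp [hbeq, hsum, hcnt]
        exact fun h => absurd h hex
    · have hcont : d.contains x = false :=
        Bool.eq_false_iff.mpr
          (fun hc => hx (hkeys ▸ (PySem.Dict.contains_iff_mem_keys _ _).mp hc))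
      have hget : d.getD x ((0 : Int), (0 : Int)) = ((0 : Int), (0 : Int)) :=
        PySem.Dict.getD_of_not_contains d _ hcont
      rw [hmodify, PySem.Dict.items_insert_of_not_contains _ _ hcont, ih, hget,
          PySem.Set.ofList_append_singleton, PySem.Set.add_of_not_mem hx, List.map_append]
      have hxpr : x ∉ pr' := fun hm => hx ((PySem.Set.mem_ofList _ _).mpr hm)
      congr 1
      · apply List.map_congr_left
        intro e hemem
        have hex : e ≠ x := fun h => hxpr (h ▸ ((PySem.Set.mem_ofList _ _).mp hemem))
        have hsum : sumIdxFrom (pr' ++ [x]) e 0 = sumIdxFrom pr' e 0 := by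
          rw [sumIdxFrom_append, sumIdxFrom_of_not_mem (l := [x]) (by simpa using hex)]
          ring
        have hcnt : (pr' ++ [x]).count e = pr'.count e := by
          rw [List.count_append]
          simp [Ne.symm hex]
        rw [hsum, hcnt]
      · have hsum : sumIdxFrom (pr' ++ [x]) x 0 = (0 : Int) + (pr'.length : Int) := by
          rw [sumIdxFrom_append, sumIdxFrom_of_not_mem hxpr]
          simp [sumIdxFrom]
        have hcnt : ((pr' ++ [x]).count x : Int) = (0 : Int) + 1 := by
          rw [List.count_append, List.count_eq_zero.mpr hxpr]
          simp
        simp only [List.map_cons, List.map_nil, hsum, hcnt]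

theorem solve_alt_eq (arr : List String) :
    solve_alt arr = PySem.List.sorted (dupSums (arr.map pyNormalize)) (fun x => x) false := by
  unfold solve_alt
  show PySem.List.sorted
      (((((PySem.List.enumerate (arr.map pyNormalize) 0).foldl dictStep
            PySem.Dict.empty).values.filter (fun sc => decide (1 < sc.2))).map
        (fun sc => sc.1))) (fun x => x) false = _
  have hvals : ((PySem.List.enumerate (arr.map pyNormalize) 0).foldl dictStep
      PySem.Dict.empty).values
      = (PySem.Set.ofList (arr.map pyNormalize)).map
          (fun e => (sumIdxFrom (arr.map pyNormalize) e 0,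
            ((arr.map pyNormalize).count e : Int))) := by
    show ((PySem.List.enumerate (arr.map pyNormalize) 0).foldl dictStep
        PySem.Dict.empty).items.map (·.2) = _
    rw [dict_items, List.map_map]
    rfl
  rw [hvals, List.filter_map]
  have hpred : ((PySem.Set.ofList (arr.map pyNormalize)).filter
        ((fun sc : Int × Int => decide (1 < sc.2)) ∘
          (fun e => (sumIdxFrom (arr.map pyNormalize) e 0,
            ((arr.map pyNormalize).count e : Int)))))
      = (PySem.Set.ofList (arr.map pyNormalize)).filter
          (fun e => decide (1 < (arr.map pyNormalize).count e)) := by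
    apply List.filter_congr
    intro e _
    simp only [Function.comp_apply, decide_eq_decide]
    exact_mod_cast Iff.rfl
  rw [hpred, List.map_map]
  rfl

-- ===== VERDICT (by name: the statement is the Claim_ definition above) =====
theorem solve_spec : Claim_equal_solve := by
  intro arr _
  unfold Spec_solve
  rw [solve_eq, solve_alt_eq]
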